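-- pv_equiv track=rewrite | github.com/emrealmaoglu/PlanifyAI | src/algorithms/nsga3/reference_points.py | get_recommended_partitions
-- ===== SOURCE A (Python) =====
-- def count_reference_points(n_objectives: int, n_partitions: int) -> int:
--     """
--     Calculate number of reference points without generating them.
--
--     Uses combinatorial formula: C(n_partitions + n_objectives - 1, n_objectives - 1)
--
--     Args:
--         n_objectives: Number of objectives
--         n_partitions: Number of partitions
--
--     Returns:
--         Number of reference points that would be generated
--
--     Example:
--         >>> count_reference_points(3, 12)  # 91 points
--         91
--         >>> count_reference_points(5, 6)   # 210 points
--         210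
--     """
--     from math import comb
--
--     return comb(n_partitions + n_objectives - 1, n_objectives - 1)
--
-- def get_recommended_partitions(n_objectives: int, target_points: int = 100) -> int:
--     """
--     Get recommended number of partitions for target number of points.
--
--     Args:
--         n_objectives: Number of objectives
--         target_points: Desired approximate number of reference points
--
--     Returns:
--         Recommended n_partitions value
--
--     Example:
--         >>> get_recommended_partitions(3, target_points=100)
--         12  # Will produce 91 points
--         >>> get_recommended_partitions(5, target_points=200)
--         6   # Will produce 210 points
--     """
--     # Binary search for partition count
--     min_p, max_p = 1, 100
--
--     while min_p < max_p:
--         mid_p = (min_p + max_p) // 2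
--         n_points = count_reference_points(n_objectives, mid_p)
--
--         if n_points < target_points:
--             min_p = mid_p + 1
--         else:
--             max_p = mid_p
--
--     return min_p
-- ===== SOURCE B (Python) =====
-- def count_reference_points(n_objectives: int, n_partitions: int) -> int:
--     from math import comb
--     return comb(n_partitions + n_objectives - 1, n_objectives - 1)
--
--
-- def get_recommended_partitions(n_objectives: int, target_points: int = 100) -> int:
--     # Linear scan: the point count is monotone in the partition count,
--     # so the first p in 1..100 reaching the target is the answer; cap at 100.
--     for p in range(1, 101):
--         if count_reference_points(n_objectives, p) >= target_points:
--             return p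
--     return 100
-- ===== Notes on version B (the rewrite author's own statement) =====
-- stated objective: simpler
-- what changed: Replaces the binary search over [1,100] with a plain linear scan returning the first partition count whose reference-point count reaches the target (cap 100), relying on monotonicity of the count in p.
import Mathlib
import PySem

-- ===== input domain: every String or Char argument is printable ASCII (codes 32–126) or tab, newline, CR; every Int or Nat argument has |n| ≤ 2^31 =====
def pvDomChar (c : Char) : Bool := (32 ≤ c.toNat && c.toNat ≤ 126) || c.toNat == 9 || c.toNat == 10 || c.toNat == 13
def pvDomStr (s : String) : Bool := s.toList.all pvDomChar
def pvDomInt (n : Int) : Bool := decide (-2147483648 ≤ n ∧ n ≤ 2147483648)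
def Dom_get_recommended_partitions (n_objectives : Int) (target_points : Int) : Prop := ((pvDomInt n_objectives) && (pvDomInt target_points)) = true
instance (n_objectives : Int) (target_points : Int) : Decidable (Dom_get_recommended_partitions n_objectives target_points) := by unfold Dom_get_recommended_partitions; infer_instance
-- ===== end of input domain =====

-- B replaces A's binary search with a linear scan for the first partition count
-- reaching the target (objective: simpler), relying on monotonicity of the count in p.


-- ===== PORT A =====
-- midpoint bounds used by the binary search's termination and its proof
theorem pvMidBounds {lo hi : Int} (h : lo < hi) :
    lo ≤ PySem.Int.floordiv (lo + hi) 2 ∧ PySem.Int.floordiv (lo + hi) 2 < hi := by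
  constructor
  · rw [PySem.Int.le_floordiv_iff_mul_le (by omega : (0:Int) < 2)]; omega
  · rw [PySem.Int.floordiv_lt_iff_lt_mul (by omega : (0:Int) < 2)]; omega
-- math.comb(a, b); under Pre_ both arguments are nonnegative at every call site,
-- so the .toNat coercions are exact there.  CPython's comb uses the symmetric
-- smaller argument (descending product / factorial); ported the same way so the
-- port is evaluable for large n_objectives; pyComb_eq_choose below proves it is
-- exactly Nat.choose.
def pyComb (t k : Nat) : Nat :=
  if k ≤ t then
    let m := min k (t - k)
    t.descFactorial m / Nat.factorial m
  else 0

def count_reference_points (n_objectives : Int) (n_partitions : Int) : Int :=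
  (pyComb (n_partitions + n_objectives - 1).toNat (n_objectives - 1).toNat : Int)

-- the 'while min_p < max_p' binary-search loop of A, step for step
def grpLoop (n_objectives target_points : Int) (min_p max_p : Int) : Int :=
  if _h : min_p < max_p then
    let mid_p := PySem.Int.floordiv (min_p + max_p) 2
    let n_points := count_reference_points n_objectives mid_p
    if n_points < target_points then
      grpLoop n_objectives target_points (mid_p + 1) max_p
    else
      grpLoop n_objectives target_points min_p mid_p
  else
    min_p
termination_by (max_p - min_p).toNat
decreasing_by
  · have := pvMidBounds _h
    omega
  · have := pvMidBounds _h
    omega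

def get_recommended_partitions (n_objectives : Int) (target_points : Int) : Int :=
  grpLoop n_objectives target_points 1 100

-- ===== PORT B =====
-- the 'for p in range(1, 101)' loop of B with its early return
def grpScan (n_objectives target_points : Int) (p : Int) : Int :=
  if _h : p ≤ 100 then
    if target_points ≤ count_reference_points n_objectives p then p
    else grpScan n_objectives target_points (p + 1)
  else
    100
termination_by (101 - p).toNat

def get_recommended_partitions_alt (n_objectives : Int) (target_points : Int) : Int :=
  grpScan n_objectives target_points 1

-- ===== PRECONDITION & SPEC =====
-- Pre_ excludes exactly n_objectives ≤ 0, on which Python's math.comb raises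
-- ValueError (in A and in B alike).
def Pre_get_recommended_partitions (n_objectives : Int) (target_points : Int) : Prop :=
  1 ≤ n_objectives
instance (n_objectives : Int) (target_points : Int) : Decidable (Pre_get_recommended_partitions n_objectives target_points) := by unfold Pre_get_recommended_partitions; infer_instance

def pvWitness_get_recommended_partitions : Int × Int := (3, 100)

def Spec_get_recommended_partitions (n_objectives : Int) (target_points : Int) (out : Int) : Prop := out = get_recommended_partitions_alt n_objectives target_points
instance (n_objectives : Int) (target_points : Int) (out : Int) : Decidable (Spec_get_recommended_partitions n_objectives target_points out) := by unfold Spec_get_recommended_partitions; infer_instance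

-- ===== CLAIM (what is proved, stated in full; the proofs are below) =====
def Claim_equal_get_recommended_partitions : Prop := ∀ (n_objectives : Int) (target_points : Int), Dom_get_recommended_partitions n_objectives target_points → Pre_get_recommended_partitions n_objectives target_points → Spec_get_recommended_partitions n_objectives target_points (get_recommended_partitions n_objectives target_points)

-- ===== LEMMAS AND PROOFS =====

-- the efficient comb is exactly the binomial coefficient
theorem pyComb_eq_choose (t k : Nat) : pyComb t k = Nat.choose t k := by
  unfold pyComb
  by_cases h : k ≤ t
  · rw [if_pos h]
    rcases le_total k (t - k) with hm | hm
    · rw [min_eq_left hm, ← Nat.choose_eq_descFactorial_div_factorial]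
    · rw [min_eq_right hm, ← Nat.choose_eq_descFactorial_div_factorial,
        Nat.choose_symm h]
  · rw [if_neg h, Nat.choose_eq_zero_of_lt (by omega)]

-- the point count is monotone in the partition count
theorem count_mono (n : Int) {p q : Int} (h : p ≤ q) :
    count_reference_points n p ≤ count_reference_points n q := by
  unfold count_reference_points
  rw [pyComb_eq_choose, pyComb_eq_choose]
  exact_mod_cast Nat.choose_le_choose _ (by omega)

-- the scan skips any prefix on which the predicate fails
theorem scan_skip (n t : Int) (lo m : Int) (hlo : lo ≤ m) (hm : m ≤ 101)
    (hfail : ∀ q, lo ≤ q → q < m → count_reference_points n q < t) :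
    grpScan n t lo = grpScan n t m := by
  by_cases h : lo = m
  · rw [h]
  · have hlt : lo < m := lt_of_le_of_ne hlo h
    rw [grpScan]
    have h100 : lo ≤ 100 := by omega
    rw [dif_pos h100, if_neg (not_le.mpr (hfail lo le_rfl hlt))]
    exact scan_skip n t (lo + 1) m (by omega) hm (fun q hq1 hq2 => hfail q (by omega) hq2)
termination_by (m - lo).toNat

-- binary search equals the linear scan from min_p, given the loop invariant:
-- max_p is either 100 or already satisfies the predicate
theorem loop_eq_scan (n t : Int) (lo hi : Int) (h1 : 1 ≤ lo) (hle : lo ≤ hi)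
    (hhi : hi ≤ 100) (hsat : hi = 100 ∨ t ≤ count_reference_points n hi) :
    grpLoop n t lo hi = grpScan n t lo := by
  rw [grpLoop]
  by_cases h : lo < hi
  · rw [dif_pos h]
    have hmid := pvMidBounds h
    set mid := PySem.Int.floordiv (lo + hi) 2 with hm
    by_cases hc : count_reference_points n mid < t
    · rw [if_pos hc]
      have : grpScan n t lo = grpScan n t (mid + 1) := by
        apply scan_skip n t lo (mid + 1) (by omega) (by omega)
        intro q hq1 hq2
        exact lt_of_le_of_lt (count_mono n (by omega)) hc
      rw [this]
      exact loop_eq_scan n t (mid + 1) hi (by omega) (by omega) hhi hsat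
    · rw [if_neg hc]
      exact loop_eq_scan n t lo mid (by omega) (by omega) (by omega)
        (Or.inr (by omega))
  · rw [dif_neg h]
    have heq : lo = hi := le_antisymm hle (not_lt.mp h)
    rcases hsat with h100 | hs
    · -- lo = hi = 100: the scan returns 100 whether or not the predicate holds there
      subst heq; rw [h100, grpScan]
      by_cases hc : t ≤ count_reference_points n 100
      · simp [hc]
      · rw [dif_pos (by omega), if_neg hc, grpScan, dif_neg (by omega)]
    · subst heq; rw [grpScan, dif_pos (by omega), if_pos hs]
termination_by (hi - lo).toNat
decreasing_by
  · have := pvMidBounds h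
    omega
  · have := pvMidBounds h
    omega

-- ===== VERDICT (by name: the statement is the Claim_ definition above) =====
theorem get_recommended_partitions_spec : Claim_equal_get_recommended_partitions := by
  intro n t _ _
  unfold Spec_get_recommended_partitions get_recommended_partitions get_recommended_partitions_alt
  exact loop_eq_scan n t 1 100 le_rfl (by omega) le_rfl (Or.inl rfl)
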